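-- pv_equiv track=rewrite | github.com/sueszli/vector-database-benchmark | dataset/python-mutated/maximum-split-of-positive-even-integers.py | maximumEvenSplit
-- ===== SOURCE A (Python) =====
-- def maximumEvenSplit(finalSum):
--     if False:
--         return 10
--     '\n        :type finalSum: int\n        :rtype: List[int]\n        '
--     if finalSum % 2:
--         return []
--     result = []
--     i = 2
--     while i <= finalSum:
--         result.append(i)
--         finalSum -= i
--         i += 2
--     result[-1] += finalSum
--     return result
-- ===== SOURCE B (Python) =====
-- def maximumEvenSplit(finalSum):
--     if finalSum % 2:
--         return []
--     if finalSum <= 0: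
--         return []
--     # largest m with m*(m+1) <= finalSum, by binary search
--     lo, hi = 1, finalSum
--     while lo < hi:
--         mid = (lo + hi + 1) // 2
--         if mid * (mid + 1) <= finalSum:
--             lo = mid
--         else:
--             hi = mid - 1
--     m = lo
--     result = [2 * j for j in range(1, m + 1)]
--     result[-1] += finalSum - m * (m + 1)
--     return result
-- ===== Notes on version B (the rewrite author's own statement) =====
-- stated objective: alternative
-- what changed: Replaces A's accumulating while-loop (append 2,4,6,... while it fits) by a binary search for the term count m (largest m with m*(m+1) <= finalSum) followed by a single range build and a last-element adjustment; Pre_ excludes even finalSum <= 0, where A's result[-1] raises IndexError on the empty list (B returns [] there).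
-- outside the precondition, e.g. on maximumEvenSplit(0): A raises IndexError, B returns []; on maximumEvenSplit(-4): A raises IndexError, B returns []
import Mathlib
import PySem

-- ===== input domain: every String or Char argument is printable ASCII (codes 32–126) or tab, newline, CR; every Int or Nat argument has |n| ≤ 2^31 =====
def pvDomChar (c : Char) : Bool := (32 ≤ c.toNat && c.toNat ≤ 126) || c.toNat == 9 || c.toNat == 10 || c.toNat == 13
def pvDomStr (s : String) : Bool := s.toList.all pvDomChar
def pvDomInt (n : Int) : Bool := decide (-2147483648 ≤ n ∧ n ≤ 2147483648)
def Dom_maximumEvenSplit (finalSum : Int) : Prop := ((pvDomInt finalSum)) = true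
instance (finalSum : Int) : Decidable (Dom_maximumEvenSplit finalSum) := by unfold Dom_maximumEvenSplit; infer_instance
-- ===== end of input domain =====

-- B replaces A's accumulating while-loop by a binary search for the term count m
-- (largest m with m*(m+1) <= finalSum) plus a single range build (objective: alternative).


-- ===== PORT A =====
-- A's while-loop: append i, finalSum -= i, i += 2; returns (result, remaining finalSum).
-- fuel is only a totality guard: s shrinks by i ≥ 2 each true step, so s.toNat + 1 never runs out.
def pvLoopA (fuel : Nat) (s i : Int) (acc : List Int) : List Int × Int :=
  match fuel with
  | 0 => (acc, s)
  | fuel + 1 => if i ≤ s then pvLoopA fuel (s - i) (i + 2) (acc ++ [i]) else (acc, s)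

def maximumEvenSplit (finalSum : Int) : List Int :=
  if PySem.Int.mod finalSum 2 ≠ 0 then []
  else
    let r := pvLoopA (finalSum.toNat + 1) finalSum 2 []
    -- Python's `result[-1] += finalSum`; on empty result Python raises IndexError (excluded by Pre_)
    match r.1 with
    | [] => []
    | _ => r.1.dropLast ++ [r.1.getLastD 0 + r.2]

-- ===== PORT B =====
-- binary search: largest m in [lo, hi] with m*(m+1) <= finalSum.
-- fuel is only a totality guard: hi - lo shrinks every step, so (hi-lo).toNat + 1 never runs out.
def pvBS (fuel : Nat) (finalSum lo hi : Int) : Int :=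
  match fuel with
  | 0 => lo
  | fuel + 1 =>
    if lo < hi then
      let mid := PySem.Int.floordiv (lo + hi + 1) 2
      if mid * (mid + 1) ≤ finalSum then pvBS fuel finalSum mid hi else pvBS fuel finalSum lo (mid - 1)
    else lo

def maximumEvenSplit_alt (finalSum : Int) : List Int :=
  if PySem.Int.mod finalSum 2 ≠ 0 then []
  else if finalSum ≤ 0 then []
  else
    let m := pvBS ((finalSum - 1).toNat + 1) finalSum 1 finalSum
    let result := (PySem.List.pyRange 1 (m + 1) 1).map (fun j => 2 * j)
    result.dropLast ++ [result.getLastD 0 + (finalSum - m * (m + 1))]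

-- ===== PRECONDITION & SPEC =====
-- Pre_ excludes exactly the even finalSum ≤ 0: there A's loop never runs and `result[-1]`
-- raises IndexError on the empty list (B returns [] on those inputs).
def Pre_maximumEvenSplit (finalSum : Int) : Prop :=
  PySem.Int.mod finalSum 2 ≠ 0 ∨ 0 < finalSum
instance (finalSum : Int) : Decidable (Pre_maximumEvenSplit finalSum) := by
  unfold Pre_maximumEvenSplit; infer_instance
def pvWitness_maximumEvenSplit : Int := (12)

def Spec_maximumEvenSplit (finalSum : Int) (out : List Int) : Prop := out = maximumEvenSplit_alt finalSum
instance (finalSum : Int) (out : List Int) : Decidable (Spec_maximumEvenSplit finalSum out) := by unfold Spec_maximumEvenSplit; infer_instance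

-- ===== CLAIM (what is proved, stated in full; the proofs are below) =====
def Claim_equal_maximumEvenSplit : Prop := ∀ (finalSum : Int), Dom_maximumEvenSplit finalSum → Pre_maximumEvenSplit finalSum → Spec_maximumEvenSplit finalSum (maximumEvenSplit finalSum)

-- ===== LEMMAS AND PROOFS =====

-- binary search returns a value with m*(m+1) ≤ S < (m+1)*(m+2), within [lo, hi]
theorem pvBS_correct (S : Int) : ∀ (fuel : Nat) (lo hi : Int), (hi - lo).toNat < fuel →
    lo ≤ hi → lo * (lo + 1) ≤ S → S < (hi + 1) * (hi + 2) →
    lo ≤ pvBS fuel S lo hi ∧ pvBS fuel S lo hi ≤ hi ∧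
      pvBS fuel S lo hi * (pvBS fuel S lo hi + 1) ≤ S ∧
      S < (pvBS fuel S lo hi + 1) * (pvBS fuel S lo hi + 2) := by
  intro fuel
  induction fuel with
  | zero => intro lo hi h; omega
  | succ fuel ih =>
    intro lo hi hfuel hle hlo hhi
    rw [pvBS]
    by_cases h : lo < hi
    · simp only [h, if_pos]
      have hmid : lo + 1 ≤ PySem.Int.floordiv (lo + hi + 1) 2 ∧ PySem.Int.floordiv (lo + hi + 1) 2 ≤ hi := by
        rw [PySem.Int.floordiv_eq_ediv_of_pos (by omega)]; omega
      set mid := PySem.Int.floordiv (lo + hi + 1) 2 with hm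
      by_cases hc : mid * (mid + 1) ≤ S
      · simp only [hc, if_pos]
        have := ih mid hi (by omega) (by omega) hc hhi
        exact ⟨by omega, this.2⟩
      · simp only [hc, if_neg, not_false_iff]
        have hS : S < (mid - 1 + 1) * (mid - 1 + 2) := by push Not at hc; nlinarith [hc]
        have := ih lo (mid - 1) (by omega) (by omega) hlo hS
        exact ⟨this.1, by omega, this.2.2⟩
    · simp only [h, if_neg, not_false_iff]
      have : lo = hi := by omega
      subst this
      exact ⟨le_refl _, le_refl _, hlo, hhi⟩

-- trajectory of A's loop, phrased with the maximal m: starting from the state reached after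
-- k-1 iterations (remaining S - (k-1)k, next term 2k), the loop appends 2k, …, 2m and stops.
theorem pvLoopA_traj (S m : Int) (hm1 : 1 ≤ m) (hml : m * (m + 1) ≤ S) (hmr : S < (m + 1) * (m + 2)) :
    ∀ (fuel : Nat) (k : Int), (m - k).toNat < fuel → 1 ≤ k → k ≤ m → ∀ (acc : List Int),
      pvLoopA fuel (S - (k - 1) * k) (2 * k) acc
        = (acc ++ (PySem.List.pyRange k (m + 1) 1).map (fun j => 2 * j), S - m * (m + 1)) := by
  intro fuel
  induction fuel with
  | zero => intro k h; omega
  | succ fuel ih =>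
    intro k hfuel hk1 hkm acc
    have hcond : 2 * k ≤ S - (k - 1) * k := by
      nlinarith [mul_le_mul_of_nonneg_left (by omega : k + 1 ≤ m + 1) (by omega : (0:Int) ≤ k), hml]
    rw [pvLoopA, if_pos hcond]
    have hs' : S - (k - 1) * k - 2 * k = S - (k + 1 - 1) * (k + 1) := by ring
    have hi' : 2 * k + 2 = 2 * (k + 1) := by ring
    rw [hs', hi']
    rw [PySem.List.pyRange_one_cons (by omega : k < m + 1)]
    by_cases hlt : k < m
    · rw [ih (k + 1) (by omega) (by omega) (by omega) (acc ++ [2 * k])]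
      simp
    · have hkm' : k = m := by omega
      subst hkm'
      cases fuel with
      | zero => rw [pvLoopA, PySem.List.pyRange_one_eq_nil (by omega)]; simp
      | succ fuel =>
        rw [pvLoopA, if_neg (by nlinarith), PySem.List.pyRange_one_eq_nil (by omega)]
        simp

-- ===== VERDICT (by name: the statement is the Claim_ definition above) =====
theorem maximumEvenSplit_spec : Claim_equal_maximumEvenSplit := by
  intro S _ hpre
  unfold Spec_maximumEvenSplit maximumEvenSplit maximumEvenSplit_alt
  by_cases hodd : PySem.Int.mod S 2 ≠ 0
  · rw [if_pos hodd, if_pos hodd]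
  · push Not at hodd
    have hpos : 0 < S := by
      rcases hpre with h | h
      · exact absurd hodd h
      · exact h
    have h2 : 2 ≤ S := by
      have := PySem.Int.floordiv_mul_add_mod S 2
      rw [hodd] at this
      omega
    simp only [hodd, ne_eq, not_true_eq_false, if_false, if_neg (by omega : ¬ S ≤ 0)]
    obtain ⟨hm1, hmS, hml, hmr⟩ := pvBS_correct S ((S - 1).toNat + 1) 1 S (by omega) (by omega)
      (by omega) (by nlinarith)
    set m := pvBS ((S - 1).toNat + 1) S 1 S with hmdef
    have htraj := pvLoopA_traj S m hm1 hml hmr (S.toNat + 1) 1 (by omega) (le_refl 1) hm1 []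
    have h1 : S - (1 - 1) * 1 = S := by ring
    have hi1 : 2 * (1 : Int) = 2 := by norm_num
    rw [h1, hi1] at htraj
    rw [htraj, PySem.List.pyRange_one_cons (by omega : (1 : Int) < m + 1)]
    simp only [List.map_cons, List.nil_append]
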